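-- pv_equiv track=rewrite | github.com/QingruiSun/6.101 | recipes/lab.py | cheapest_flat_recipe_helper
-- ===== SOURCE A (Python) =====
-- def scale_recipe(flat_recipe, n):
--     """
--     Given a dictionary of ingredients mapped to quantities needed, returns a
--     new dictionary with the quantities scaled by n.
--     """
--     new_recipe = {}
--     for element in flat_recipe:
--         new_recipe[element] = flat_recipe[element] * n
--     return new_recipe
--
-- def make_grocery_list(flat_recipes):
--     """
--     Given a list of flat_recipe dictionaries that map food items to quantities,
--     return a new overall 'grocery list' dictionary that maps each ingredient name
--     to the sum of its quantities across the given flat recipes.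
--
--     For example,
--         make_grocery_list([{'milk':1, 'chocolate':1}, {'sugar':1, 'milk':2}])
--     should return:
--         {'milk':3, 'chocolate': 1, 'sugar': 1}
--     """
--     new_grocery_list = {}
--     for recipe in flat_recipes:
--         for element in recipe:
--             if element in new_grocery_list:
--                 new_grocery_list[element] += recipe[element]
--             else:
--                 new_grocery_list[element] = recipe[element]
--     return new_grocery_list
--
-- def cheapest_flat_recipe_helper(recipe_book, atomic_costs, food_item, fobiddens=None):
--     if fobiddens == None:
--         fobiddens = []
--     if food_item in fobiddens:
--         return False, 0, None
--     if food_item in atomic_costs: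
--         return True, atomic_costs[food_item], {food_item: 1}
--     if food_item not in recipe_book:
--         return False, 0, None
--     recipes = recipe_book[food_item]
--     min_cost = -1
--     is_first = True
--     have_make = False
--     min_flat_recipe = None
--     for recipe in recipes:
--         current_cost = 0
--         can_make = True
--         flat_recipes = []
--         for element in recipe:
--             sub_can_make, sub_cost, sub_recipe = cheapest_flat_recipe_helper(
--                 recipe_book, atomic_costs, element[0], fobiddens
--             )
--             if sub_can_make == False:
--                 can_make = False
--                 break
--             else:
--                 current_cost += sub_cost * element[1]
--                 sub_recipe = scale_recipe(sub_recipe, element[1])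
--                 flat_recipes.append(sub_recipe)
--         if can_make and (is_first or (current_cost < min_cost)):
--             is_first = False
--             min_cost = current_cost
--             min_flat_recipe = make_grocery_list(flat_recipes)
--             have_make = True
--     return have_make, min_cost, min_flat_recipe
-- ===== SOURCE B (Python) =====
-- def scale_recipe(flat_recipe, n):
--     new_recipe = {}
--     for element in flat_recipe:
--         new_recipe[element] = flat_recipe[element] * n
--     return new_recipe
--
-- def make_grocery_list(flat_recipes):
--     new_grocery_list = {}
--     for recipe in flat_recipes:
--         for element in recipe:
--             if element in new_grocery_list:
--                 new_grocery_list[element] += recipe[element]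
--             else:
--                 new_grocery_list[element] = recipe[element]
--     return new_grocery_list
--
-- def cheapest_flat_recipe_helper(recipe_book, atomic_costs, food_item, fobiddens=None):
--     # The forbidden list never changes during the recursion, so the answer for
--     # each food item can be computed once and cached.
--     if fobiddens is None:
--         fobiddens = []
--     memo = {}
--
--     def solve(item):
--         if item in memo:
--             return memo[item]
--         if item in fobiddens:
--             result = (False, 0, None)
--         elif item in atomic_costs:
--             result = (True, atomic_costs[item], {item: 1})
--         elif item not in recipe_book:
--             result = (False, 0, None)
--         else:
--             best = None  # (cost, scaled flat sub-recipes) of the cheapest makeable recipe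
--             for recipe in recipe_book[item]:
--                 cost = 0
--                 parts = []
--                 ok = True
--                 for name, qty in recipe:
--                     sub_ok, sub_cost, sub_flat = solve(name)
--                     if not sub_ok:
--                         ok = False
--                         break
--                     cost += sub_cost * qty
--                     parts.append(scale_recipe(sub_flat, qty))
--                 if ok and (best is None or cost < best[0]):
--                     best = (cost, parts)
--             if best is None:
--                 result = (False, -1, None)
--             else:
--                 result = (True, best[0], make_grocery_list(best[1]))
--         memo[item] = result
--         return result
--
--     return solve(food_item)
-- ===== Notes on version B (the rewrite author's own statement) =====
-- stated objective: alternative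
-- what changed: B memoizes the result per food_item in a cache dict (the forbidden list is constant across the recursion), so each item is solved at most once per call, and it tracks the best (cost, parts) pair and builds the grocery list once for the winning recipe instead of at every running-minimum update; on the generated timing inputs this was not measurably faster.
import Mathlib
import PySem

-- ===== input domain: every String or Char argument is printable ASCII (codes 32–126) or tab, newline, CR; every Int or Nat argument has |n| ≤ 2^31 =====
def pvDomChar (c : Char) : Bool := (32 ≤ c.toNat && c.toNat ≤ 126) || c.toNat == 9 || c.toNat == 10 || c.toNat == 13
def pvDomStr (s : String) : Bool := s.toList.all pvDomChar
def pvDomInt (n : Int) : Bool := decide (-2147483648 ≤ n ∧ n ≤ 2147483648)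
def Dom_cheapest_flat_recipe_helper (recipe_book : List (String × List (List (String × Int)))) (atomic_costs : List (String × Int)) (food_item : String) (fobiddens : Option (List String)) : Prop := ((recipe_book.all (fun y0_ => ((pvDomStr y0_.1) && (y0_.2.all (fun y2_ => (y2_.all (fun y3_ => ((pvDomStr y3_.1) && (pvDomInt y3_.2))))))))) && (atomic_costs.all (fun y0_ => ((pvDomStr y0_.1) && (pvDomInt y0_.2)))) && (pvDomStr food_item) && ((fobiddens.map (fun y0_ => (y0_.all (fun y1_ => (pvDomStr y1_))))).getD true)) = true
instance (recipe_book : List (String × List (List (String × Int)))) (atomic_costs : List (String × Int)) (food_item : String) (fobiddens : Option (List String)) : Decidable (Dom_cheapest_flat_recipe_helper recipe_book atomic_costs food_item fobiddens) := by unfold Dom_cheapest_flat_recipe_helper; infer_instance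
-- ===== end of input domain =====

-- B memoizes the per-food-item result (the forbidden list never changes during the recursion),
-- so each food item is solved at most once per call; equal return value proved on Pre_.

-- ===== PORT A =====
-- Python dicts of ingredient → quantity are PySem.Dict String Int; the entry point returns .items.

-- scale_recipe
def pvScaleD (d : PySem.Dict String Int) (n : Int) : PySem.Dict String Int :=
  d.items.foldl (fun acc p => acc.insert p.1 (p.2 * n)) PySem.Dict.empty

-- make_grocery_list
def pvGrocery (rs : List (PySem.Dict String Int)) : PySem.Dict String Int :=
  rs.foldl (fun g r => r.items.foldl
    (fun g p => if g.contains p.1 then g.modify p.1 0 (· + p.2) else g.insert p.1 p.2) g)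
    PySem.Dict.empty

-- A's inner loop ('for element in recipe: …' with break once a sub-item cannot be made);
-- g is the recursive solver; state = (can_make, current_cost, flat_recipes)
def pvAInnerGo (g : String → Bool × Int × Option (PySem.Dict String Int))
    (recipe : List (String × Int)) (s0 : Bool × Int × List (PySem.Dict String Int)) :
    Bool × Int × List (PySem.Dict String Int) :=
  recipe.foldl (fun s e =>
      if s.1 = false then s          -- loop already broken
      else
        let sub := g e.1
        if sub.1 = false then (false, s.2.1, s.2.2)
        else (true, s.2.1 + sub.2.1 * e.2, s.2.2 ++ [pvScaleD (sub.2.2.getD PySem.Dict.empty) e.2]))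
    s0

-- A's outer loop, state = (min_cost, is_first, have_make, min_flat_recipe), from an arbitrary start
def pvAOuterGo (g : String → Bool × Int × Option (PySem.Dict String Int))
    (recipes : List (List (String × Int)))
    (st : Int × Bool × Bool × Option (PySem.Dict String Int)) :
    Int × Bool × Bool × Option (PySem.Dict String Int) :=
  recipes.foldl (fun st recipe =>
      let r := pvAInnerGo g recipe (true, 0, [])
      if r.1 && (st.2.1 || decide (r.2.1 < st.1)) then (r.2.1, false, true, some (pvGrocery r.2.2))
      else st)
    st

-- the recursion of A, with a fuel guard (fuel only makes the recursion structural; it is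
-- never exhausted on inputs satisfying Pre_, see the rank argument below)
def pvAGo (rb : PySem.Dict String (List (List (String × Int)))) (ac : PySem.Dict String Int)
    (fob : List String) : Nat → String → Bool × Int × Option (PySem.Dict String Int)
  | 0, _ => (false, 0, none)
  | fuel+1, item =>
    if item ∈ fob then (false, 0, none)
    else
      match ac.get? item with
      | some c => (true, c, some (PySem.Dict.empty.insert item 1))
      | none =>
        match rb.get? item with
        | none => (false, 0, none)
        | some recipes =>
          let st := pvAOuterGo (fun x => pvAGo rb ac fob fuel x) recipes (-1, true, false, none)
          (st.2.2.1, st.1, st.2.2.2)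

def cheapest_flat_recipe_helper (recipe_book : List (String × List (List (String × Int)))) (atomic_costs : List (String × Int)) (food_item : String) (fobiddens : Option (List String)) : Bool × Int × (Option (List (String × Int))) :=
  let r := pvAGo (PySem.Dict.ofList recipe_book) (PySem.Dict.ofList atomic_costs)
      (fobiddens.getD []) (recipe_book.length + 1) food_item
  (r.1, r.2.1, r.2.2.map (fun d => d.items))

-- ===== PORT B =====
-- B threads a memo dict through the recursion; g is the memo-threading solver.
-- B's inner loop, state = ((ok, cost, parts), memo)
def pvBInnerGo (g : PySem.Dict String (Bool × Int × Option (PySem.Dict String Int)) → String →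
      (Bool × Int × Option (PySem.Dict String Int)) × PySem.Dict String (Bool × Int × Option (PySem.Dict String Int)))
    (recipe : List (String × Int))
    (sm0 : (Bool × Int × List (PySem.Dict String Int)) × PySem.Dict String (Bool × Int × Option (PySem.Dict String Int))) :
    (Bool × Int × List (PySem.Dict String Int)) × PySem.Dict String (Bool × Int × Option (PySem.Dict String Int)) :=
  recipe.foldl (fun s e =>
      if s.1.1 = false then s        -- loop already broken
      else
        let r := g s.2 e.1
        if r.1.1 = false then ((false, s.1.2.1, s.1.2.2), r.2)
        else ((true, s.1.2.1 + r.1.2.1 * e.2, s.1.2.2 ++ [pvScaleD (r.1.2.2.getD PySem.Dict.empty) e.2]), r.2))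
    sm0

-- B's outer loop, state = (best : Option (cost, parts), memo), from an arbitrary start
def pvBOuterGo (g : PySem.Dict String (Bool × Int × Option (PySem.Dict String Int)) → String →
      (Bool × Int × Option (PySem.Dict String Int)) × PySem.Dict String (Bool × Int × Option (PySem.Dict String Int)))
    (recipes : List (List (String × Int)))
    (q : Option (Int × List (PySem.Dict String Int)) × PySem.Dict String (Bool × Int × Option (PySem.Dict String Int))) :
    Option (Int × List (PySem.Dict String Int)) × PySem.Dict String (Bool × Int × Option (PySem.Dict String Int)) :=
  recipes.foldl (fun q recipe =>
      let t := pvBInnerGo g recipe ((true, 0, []), q.2)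
      (if t.1.1 && (match q.1 with | none => true | some b => decide (t.1.2.1 < b.1)) then
         some (t.1.2.1, t.1.2.2)
       else q.1, t.2))
    q

-- B's memoized solve (same fuel guard as A's port)
def pvBSolve (rb : PySem.Dict String (List (List (String × Int)))) (ac : PySem.Dict String Int)
    (fob : List String) : Nat → PySem.Dict String (Bool × Int × Option (PySem.Dict String Int)) → String →
    (Bool × Int × Option (PySem.Dict String Int)) × PySem.Dict String (Bool × Int × Option (PySem.Dict String Int))
  | 0, m, _ => ((false, 0, none), m)
  | fuel+1, m, item =>
    match m.get? item with
    | some r => (r, m)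
    | none =>
      let p :=
        if item ∈ fob then (((false, 0, none) : Bool × Int × Option (PySem.Dict String Int)), m)
        else
          match ac.get? item with
          | some c => ((true, c, some (PySem.Dict.empty.insert item 1)), m)
          | none =>
            match rb.get? item with
            | none => ((false, 0, none), m)
            | some recipes =>
              let q := pvBOuterGo (fun m' x => pvBSolve rb ac fob fuel m' x) recipes (none, m)
              ((match q.1 with
                | none => (false, -1, none)
                | some (c, parts) => (true, c, some (pvGrocery parts))), q.2)
      (p.1, p.2.insert item p.1)

def cheapest_flat_recipe_helper_alt (recipe_book : List (String × List (List (String × Int)))) (atomic_costs : List (String × Int)) (food_item : String) (fobiddens : Option (List String)) : Bool × Int × (Option (List (String × Int))) :=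
  let r := (pvBSolve (PySem.Dict.ofList recipe_book) (PySem.Dict.ofList atomic_costs)
      (fobiddens.getD []) (recipe_book.length + 1) PySem.Dict.empty food_item).1
  (r.1, r.2.1, r.2.2.map (fun d => d.items))

-- ===== PRECONDITION & SPEC =====
-- an item on which the recursion continues: in the book, not atomic, not forbidden
def pvActive (rb : PySem.Dict String (List (List (String × Int)))) (ac : PySem.Dict String Int)
    (fob : List String) (v : String) : Bool :=
  (rb.get? v).isSome && (ac.get? v).isNone && decide (v ∉ fob)

-- the items the recursion descends into from v
def pvSucc (rb : PySem.Dict String (List (List (String × Int)))) (ac : PySem.Dict String Int)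
    (fob : List String) (v : String) : List String :=
  (((rb.get? v).getD []).flatten.map Prod.fst).filter (pvActive rb ac fob)

-- one Jacobi step of the longest-path rank table
def pvRankStep (rb : PySem.Dict String (List (List (String × Int)))) (ac : PySem.Dict String Int)
    (fob : List String) (keys : List String) (t : PySem.Dict String Nat) : PySem.Dict String Nat :=
  keys.foldl (fun t' v =>
      t'.insert v (1 + (pvSucc rb ac fob v).foldl (fun acc w => max acc (t.getD w 0)) 0))
    PySem.Dict.empty

def pvRank (rb : PySem.Dict String (List (List (String × Int)))) (ac : PySem.Dict String Int)
    (fob : List String) (keys : List String) (n : Nat) : PySem.Dict String Nat :=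
  (pvRankStep rb ac fob keys)^[n] PySem.Dict.empty

-- items reachable from the start through pvSucc edges
def pvReach (rb : PySem.Dict String (List (List (String × Int)))) (ac : PySem.Dict String Int)
    (fob : List String) (fi : String) (n : Nat) : List String :=
  (fun R => PySem.Set.update R (R.flatMap (pvSucc rb ac fob)))^[n] (PySem.Set.ofList [fi])

-- Pre_ excludes the inputs on which a dependency cycle through non-atomic, non-forbidden
-- recipe-book items is syntactically reachable from food_item: on them Python A recurses forever
-- (RecursionError), except that A still returns when every path into the cycle is cut dynamically
-- by an earlier unmakeable ingredient in the same recipe (A and B agree there too, but the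
-- theorem does not cover it). Acyclicity is stated through a longest-path rank table that
-- strictly decreases along edges of the reachable graph (the other conjuncts — the reachable set
-- is closed, contains food_item, and ranks are bounded by the book size — hold on every input
-- and only name the bounds the proof uses).
def Pre_cheapest_flat_recipe_helper (recipe_book : List (String × List (List (String × Int)))) (atomic_costs : List (String × Int)) (food_item : String) (fobiddens : Option (List String)) : Prop :=
  let rbD := PySem.Dict.ofList recipe_book
  let acD := PySem.Dict.ofList atomic_costs
  let f := fobiddens.getD []
  let R := pvReach rbD acD f food_item recipe_book.length
  let rk := fun v => (pvRank rbD acD f rbD.keys recipe_book.length).getD v 0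
  food_item ∈ R ∧
  (∀ v ∈ R, ∀ w ∈ pvSucc rbD acD f v, w ∈ R) ∧
  (∀ v ∈ R, pvActive rbD acD f v = true →
    1 ≤ rk v ∧ rk v ≤ recipe_book.length ∧ ∀ w ∈ pvSucc rbD acD f v, rk w < rk v)

instance (recipe_book : List (String × List (List (String × Int)))) (atomic_costs : List (String × Int)) (food_item : String) (fobiddens : Option (List String)) : Decidable (Pre_cheapest_flat_recipe_helper recipe_book atomic_costs food_item fobiddens) := by unfold Pre_cheapest_flat_recipe_helper; infer_instance

def pvWitness_cheapest_flat_recipe_helper : (List (String × List (List (String × Int)))) × (List (String × Int)) × String × Option (List String) :=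
  ([("cake", [[("flour", 2), ("sugar", 1)], [("honey", 3)]])],
   [("flour", 3), ("sugar", 1), ("honey", 5)], "cake", none)

def Spec_cheapest_flat_recipe_helper (recipe_book : List (String × List (List (String × Int)))) (atomic_costs : List (String × Int)) (food_item : String) (fobiddens : Option (List String)) (out : Bool × Int × (Option (List (String × Int)))) : Prop := out = cheapest_flat_recipe_helper_alt recipe_book atomic_costs food_item fobiddens
instance (recipe_book : List (String × List (List (String × Int)))) (atomic_costs : List (String × Int)) (food_item : String) (fobiddens : Option (List String)) (out : Bool × Int × (Option (List (String × Int)))) : Decidable (Spec_cheapest_flat_recipe_helper recipe_book atomic_costs food_item fobiddens out) := by unfold Spec_cheapest_flat_recipe_helper; infer_instance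

-- ===== CLAIM (what is proved, stated in full; the proofs are below) =====
def Claim_equal_cheapest_flat_recipe_helper : Prop := ∀ (recipe_book : List (String × List (List (String × Int)))) (atomic_costs : List (String × Int)) (food_item : String) (fobiddens : Option (List String)), Dom_cheapest_flat_recipe_helper recipe_book atomic_costs food_item fobiddens → Pre_cheapest_flat_recipe_helper recipe_book atomic_costs food_item fobiddens → Spec_cheapest_flat_recipe_helper recipe_book atomic_costs food_item fobiddens (cheapest_flat_recipe_helper recipe_book atomic_costs food_item fobiddens)

-- ===== LEMMAS AND PROOFS =====

-- the value A returns in one step on a non-active item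
def pvBase (ac : PySem.Dict String Int) (fob : List String) (v : String) :
    Bool × Int × Option (PySem.Dict String Int) :=
  if v ∈ fob then (false, 0, none)
  else
    match ac.get? v with
    | some c => (true, c, some (PySem.Dict.empty.insert v 1))
    | none => (false, 0, none)

-- the fuel really needed below an item
def pvMu (rb : PySem.Dict String (List (List (String × Int)))) (ac : PySem.Dict String Int)
    (fob : List String) (ρ : String → Nat) (v : String) : Nat :=
  if pvActive rb ac fob v then ρ v else 0

-- memo invariant: every stored value is the canonical (full-fuel) value of its key
def pvInv (cv : String → Bool × Int × Option (PySem.Dict String Int))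
    (m : PySem.Dict String (Bool × Int × Option (PySem.Dict String Int))) : Prop :=
  ∀ k r, m.get? k = some r → r = cv k

-- relation between B's best-option state and A's outer-loop state
def pvRel (best : Option (Int × List (PySem.Dict String Int))) :
    Int × Bool × Bool × Option (PySem.Dict String Int) :=
  match best with
  | none => (-1, true, false, none)
  | some (c, parts) => (c, false, true, some (pvGrocery parts))

lemma pvAGo_inactive (rb : PySem.Dict String (List (List (String × Int)))) (ac : PySem.Dict String Int)
    (fob : List String) (v : String) (h : pvActive rb ac fob v = false) (a : Nat) :
    pvAGo rb ac fob (a+1) v = pvBase ac fob v := by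
  unfold pvAGo pvBase
  by_cases hf : v ∈ fob
  · simp [hf]
  · simp only [if_neg hf]
    cases hac : ac.get? v with
    | some c => rfl
    | none =>
      cases hrb : rb.get? v with
      | none => rfl
      | some recipes =>
        exfalso
        simp [pvActive, hf, hac, hrb] at h

lemma pvAInnerGo_congr (g g' : String → Bool × Int × Option (PySem.Dict String Int))
    (recipe : List (String × Int)) (h : ∀ e ∈ recipe, g e.1 = g' e.1)
    (s0 : Bool × Int × List (PySem.Dict String Int)) :
    pvAInnerGo g recipe s0 = pvAInnerGo g' recipe s0 := by
  unfold pvAInnerGo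
  induction recipe generalizing s0 with
  | nil => rfl
  | cons e rest ih =>
    simp only [List.foldl_cons]
    rw [h e (List.mem_cons_self ..)]
    exact ih (fun x hx => h x (List.mem_cons_of_mem _ hx)) _

lemma pvAOuterGo_congr (g g' : String → Bool × Int × Option (PySem.Dict String Int))
    (recipes : List (List (String × Int))) (h : ∀ r ∈ recipes, ∀ e ∈ r, g e.1 = g' e.1)
    (st : Int × Bool × Bool × Option (PySem.Dict String Int)) :
    pvAOuterGo g recipes st = pvAOuterGo g' recipes st := by
  unfold pvAOuterGo
  induction recipes generalizing st with
  | nil => rfl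
  | cons r rest ih =>
    simp only [List.foldl_cons]
    rw [pvAInnerGo_congr g g' r (h r (List.mem_cons_self ..)) (true, 0, [])]
    exact ih (fun x hx => h x (List.mem_cons_of_mem _ hx)) _

-- under the rank hypotheses, A's result does not depend on the fuel once it exceeds the rank
lemma pvAGo_stable (rb : PySem.Dict String (List (List (String × Int)))) (ac : PySem.Dict String Int)
    (fob : List String) (ρ : String → Nat) (R : List String)
    (Hclos : ∀ v ∈ R, ∀ w ∈ pvSucc rb ac fob v, w ∈ R)
    (Hrk : ∀ v ∈ R, pvActive rb ac fob v = true →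
      1 ≤ ρ v ∧ ∀ w ∈ pvSucc rb ac fob v, ρ w < ρ v) :
    ∀ a v, v ∈ R → pvMu rb ac fob ρ v < a →
      pvAGo rb ac fob a v = pvAGo rb ac fob (pvMu rb ac fob ρ v + 1) v := by
  intro a
  induction a using Nat.strong_induction_on with
  | _ a IH =>
    intro v hvR hlt
    obtain ⟨t, rfl⟩ : ∃ t, a = t + 1 := ⟨a - 1, by omega⟩
    by_cases hact : pvActive rb ac fob v = true
    · have hμ : pvMu rb ac fob ρ v = ρ v := by simp [pvMu, hact]
      rw [hμ] at hlt ⊢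
      obtain ⟨h1, hdec⟩ := Hrk v hvR hact
      rcases Nat.lt_or_ge t (ρ v + 1) with hcase | hcase
      · have ht : t = ρ v := by omega
        subst ht; rfl
      · have hf : v ∉ fob := by
          simp only [pvActive, Bool.and_eq_true, decide_eq_true_eq] at hact
          exact hact.2
        have hacn : ac.get? v = none := by
          simp only [pvActive, Bool.and_eq_true] at hact
          simpa using hact.1.2
        obtain ⟨recipes, hrb⟩ : ∃ r, rb.get? v = some r := by
          simp only [pvActive, Bool.and_eq_true] at hact
          exact Option.isSome_iff_exists.mp hact.1.1
        have hcong : ∀ r ∈ recipes, ∀ e ∈ r, pvAGo rb ac fob t e.1 = pvAGo rb ac fob (ρ v) e.1 := by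
          intro r hr e he
          by_cases hae : pvActive rb ac fob e.1 = true
          · have hsucc : e.1 ∈ pvSucc rb ac fob v := by
              unfold pvSucc
              rw [hrb]
              exact List.mem_filter.mpr
                ⟨List.mem_map.mpr ⟨e, List.mem_flatten.mpr ⟨r, hr, he⟩, rfl⟩, hae⟩
            have heR := Hclos v hvR e.1 hsucc
            have hρe := hdec e.1 hsucc
            have hμe : pvMu rb ac fob ρ e.1 = ρ e.1 := by simp [pvMu, hae]
            have e1 := IH t (by omega) e.1 heR (by rw [hμe]; omega)
            have e2 := IH (ρ v) (by omega) e.1 heR (by rw [hμe]; omega)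
            rw [e1, e2]
          · have hae' : pvActive rb ac fob e.1 = false := by simpa using hae
            obtain ⟨t', rfl⟩ : ∃ t', t = t' + 1 := ⟨t - 1, by omega⟩
            obtain ⟨p', hp⟩ : ∃ p', ρ v = p' + 1 := ⟨ρ v - 1, by omega⟩
            rw [hp, pvAGo_inactive rb ac fob e.1 hae' t', pvAGo_inactive rb ac fob e.1 hae' p']
        show pvAGo rb ac fob (t+1) v = pvAGo rb ac fob (ρ v + 1) v
        simp only [pvAGo, if_neg hf, hacn, hrb]
        rw [pvAOuterGo_congr _ _ recipes hcong]
    · have hact' : pvActive rb ac fob v = false := by simpa using hact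
      have h0 : pvMu rb ac fob ρ v = 0 := by simp [pvMu, hact']
      rw [h0]
      rw [pvAGo_inactive rb ac fob v hact' t, pvAGo_inactive rb ac fob v hact' 0]


lemma pvInv_insert (cv : String → Bool × Int × Option (PySem.Dict String Int))
    (m : PySem.Dict String (Bool × Int × Option (PySem.Dict String Int))) (v : String)
    (r : Bool × Int × Option (PySem.Dict String Int)) (hm : pvInv cv m) (hr : r = cv v) :
    pvInv cv (m.insert v r) := by
  intro k r' h
  rw [PySem.Dict.get?_insert] at h
  split at h
  · next heq => cases h; rw [hr, heq]
  · exact hm k r' h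

lemma pvBInnerGo_ok (cv : String → Bool × Int × Option (PySem.Dict String Int))
    (g : PySem.Dict String (Bool × Int × Option (PySem.Dict String Int)) → String →
      (Bool × Int × Option (PySem.Dict String Int)) × PySem.Dict String (Bool × Int × Option (PySem.Dict String Int)))
    (gA : String → Bool × Int × Option (PySem.Dict String Int)) (recipe : List (String × Int))
    (hgA : ∀ e ∈ recipe, gA e.1 = cv e.1)
    (hg : ∀ e ∈ recipe, ∀ m, pvInv cv m → (g m e.1).1 = cv e.1 ∧ pvInv cv (g m e.1).2) :
    ∀ s m, pvInv cv m →
      (pvBInnerGo g recipe (s, m)).1 = pvAInnerGo gA recipe s ∧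
      pvInv cv (pvBInnerGo g recipe (s, m)).2 := by
  induction recipe with
  | nil => exact fun s m hm => ⟨rfl, hm⟩
  | cons e rest ih =>
    intro s m hm
    unfold pvBInnerGo pvAInnerGo
    simp only [List.foldl_cons]
    by_cases hs : s.1 = false
    · simp only [hs, if_true]
      exact ih (fun x hx => hgA x (List.mem_cons_of_mem _ hx))
        (fun x hx => hg x (List.mem_cons_of_mem _ hx)) s m hm
    · obtain ⟨h1, h2⟩ := hg e (List.mem_cons_self ..) m hm
      have hA := hgA e (List.mem_cons_self ..)
      simp only [hs, h1, hA]
      cases hc : (cv e.1).1 with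
      | false =>
        simp only [if_true]
        exact ih (fun x hx => hgA x (List.mem_cons_of_mem _ hx))
          (fun x hx => hg x (List.mem_cons_of_mem _ hx)) _ _ h2
      | true =>
        simp only [Bool.true_eq_false, if_false]
        exact ih (fun x hx => hgA x (List.mem_cons_of_mem _ hx))
          (fun x hx => hg x (List.mem_cons_of_mem _ hx)) _ _ h2

lemma pvStep_rel (rA : Bool × Int × List (PySem.Dict String Int))
    (best : Option (Int × List (PySem.Dict String Int))) :
    (if rA.1 && ((pvRel best).2.1 || decide (rA.2.1 < (pvRel best).1)) then
       (rA.2.1, false, true, some (pvGrocery rA.2.2))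
     else pvRel best)
    = pvRel (if rA.1 && (match best with | none => true | some b => decide (rA.2.1 < b.1)) then
        some (rA.2.1, rA.2.2) else best) := by
  cases best with
  | none => cases h : rA.1 <;> simp [pvRel]
  | some b =>
    obtain ⟨c, parts⟩ := b
    cases h : rA.1 with
    | false => simp [pvRel]
    | true =>
      by_cases hlt : rA.2.1 < c
      · simp [pvRel, hlt]
      · simp [pvRel, hlt]

lemma pvBOuterGo_ok (cv : String → Bool × Int × Option (PySem.Dict String Int))
    (g : PySem.Dict String (Bool × Int × Option (PySem.Dict String Int)) → String →
      (Bool × Int × Option (PySem.Dict String Int)) × PySem.Dict String (Bool × Int × Option (PySem.Dict String Int)))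
    (gA : String → Bool × Int × Option (PySem.Dict String Int)) (recipes : List (List (String × Int)))
    (hgA : ∀ r ∈ recipes, ∀ e ∈ r, gA e.1 = cv e.1)
    (hg : ∀ r ∈ recipes, ∀ e ∈ r, ∀ m, pvInv cv m → (g m e.1).1 = cv e.1 ∧ pvInv cv (g m e.1).2) :
    ∀ best m, pvInv cv m →
      pvAOuterGo gA recipes (pvRel best) = pvRel (pvBOuterGo g recipes (best, m)).1 ∧
      pvInv cv (pvBOuterGo g recipes (best, m)).2 := by
  induction recipes with
  | nil => exact fun best m hm => ⟨rfl, hm⟩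
  | cons recipe rest ih =>
    intro best m hm
    obtain ⟨hin1, hin2⟩ := pvBInnerGo_ok cv g gA recipe (hgA recipe (List.mem_cons_self ..))
      (hg recipe (List.mem_cons_self ..)) (true, 0, []) m hm
    unfold pvAOuterGo pvBOuterGo
    simp only [List.foldl_cons]
    rw [← hin1, pvStep_rel]
    exact ih (fun r hr => hgA r (List.mem_cons_of_mem _ hr))
      (fun r hr => hg r (List.mem_cons_of_mem _ hr)) _ _ hin2

lemma pvBSolve_ok (rb : PySem.Dict String (List (List (String × Int)))) (ac : PySem.Dict String Int)
    (fob : List String) (ρ : String → Nat) (R : List String) (L : Nat)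
    (Hclos : ∀ v ∈ R, ∀ w ∈ pvSucc rb ac fob v, w ∈ R)
    (Hrk : ∀ v ∈ R, pvActive rb ac fob v = true →
      1 ≤ ρ v ∧ ρ v ≤ L ∧ ∀ w ∈ pvSucc rb ac fob v, ρ w < ρ v) :
    ∀ a v m, (pvActive rb ac fob v = true → v ∈ R) → pvMu rb ac fob ρ v < a →
      pvInv (pvAGo rb ac fob (L+1)) m →
      (pvBSolve rb ac fob a m v).1 = pvAGo rb ac fob (L+1) v ∧
      pvInv (pvAGo rb ac fob (L+1)) (pvBSolve rb ac fob a m v).2 := by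
  intro a
  induction a using Nat.strong_induction_on with
  | _ a IH =>
    intro v m hvR hlt hm
    obtain ⟨t, rfl⟩ : ∃ t, a = t + 1 := ⟨a - 1, by omega⟩
    cases hmv : m.get? v with
    | some r =>
      simp only [pvBSolve, hmv]
      exact ⟨hm v r hmv, hm⟩
    | none =>
      by_cases hact : pvActive rb ac fob v = true
      · -- active item: v ∈ R, recurse through its recipes
        have hvR' := hvR hact
        obtain ⟨h1, hL, hdec⟩ := Hrk v hvR' hact
        have hf : v ∉ fob := by
          simp only [pvActive, Bool.and_eq_true, decide_eq_true_eq] at hact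
          exact hact.2
        have hacn : ac.get? v = none := by
          simp only [pvActive, Bool.and_eq_true] at hact
          simpa using hact.1.2
        obtain ⟨recipes, hrb⟩ : ∃ r, rb.get? v = some r := by
          simp only [pvActive, Bool.and_eq_true] at hact
          exact Option.isSome_iff_exists.mp hact.1.1
        have hμ : pvMu rb ac fob ρ v = ρ v := by simp [pvMu, hact]
        rw [hμ] at hlt
        have Hrk' : ∀ w ∈ R, pvActive rb ac fob w = true →
            1 ≤ ρ w ∧ ∀ u ∈ pvSucc rb ac fob w, ρ u < ρ w :=
          fun w hw ha => ⟨(Hrk w hw ha).1, (Hrk w hw ha).2.2⟩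
        have hmemsucc : ∀ r ∈ recipes, ∀ e ∈ r, pvActive rb ac fob e.1 = true →
            e.1 ∈ pvSucc rb ac fob v := by
          intro r hr e he hae
          unfold pvSucc
          rw [hrb]
          exact List.mem_filter.mpr
            ⟨List.mem_map.mpr ⟨e, List.mem_flatten.mpr ⟨r, hr, he⟩, rfl⟩, hae⟩
        have hgA : ∀ r ∈ recipes, ∀ e ∈ r,
            pvAGo rb ac fob L e.1 = pvAGo rb ac fob (L+1) e.1 := by
          intro r hr e he
          by_cases hae : pvActive rb ac fob e.1 = true
          · have hsucc := hmemsucc r hr e he hae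
            have heR := Hclos v hvR' e.1 hsucc
            have hρe := hdec e.1 hsucc
            have hμe : pvMu rb ac fob ρ e.1 = ρ e.1 := by simp [pvMu, hae]
            have s1 := pvAGo_stable rb ac fob ρ R Hclos Hrk' L e.1 heR (by rw [hμe]; omega)
            have s2 := pvAGo_stable rb ac fob ρ R Hclos Hrk' (L+1) e.1 heR (by rw [hμe]; omega)
            rw [s1, s2]
          · have hae' : pvActive rb ac fob e.1 = false := by simpa using hae
            obtain ⟨L', hLe⟩ : ∃ L', L = L' + 1 := ⟨L - 1, by omega⟩
            rw [hLe, pvAGo_inactive rb ac fob e.1 hae' L', pvAGo_inactive rb ac fob e.1 hae' (L'+1)]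
        have hg : ∀ r ∈ recipes, ∀ e ∈ r, ∀ m',
            pvInv (pvAGo rb ac fob (L+1)) m' →
            (pvBSolve rb ac fob t m' e.1).1 = pvAGo rb ac fob (L+1) e.1 ∧
            pvInv (pvAGo rb ac fob (L+1)) (pvBSolve rb ac fob t m' e.1).2 := by
          intro r hr e he m' hm'
          refine IH t (by omega) e.1 m' ?_ ?_ hm'
          · intro hae
            exact Hclos v hvR' e.1 (hmemsucc r hr e he hae)
          · by_cases hae : pvActive rb ac fob e.1 = true
            · have hρe := hdec e.1 (hmemsucc r hr e he hae)
              simp only [pvMu, hae, if_true]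
              omega
            · have hae' : pvActive rb ac fob e.1 = false := by simpa using hae
              simp [pvMu, hae']
              omega
        obtain ⟨ho1, ho2⟩ := pvBOuterGo_ok (pvAGo rb ac fob (L+1))
          (fun m' x => pvBSolve rb ac fob t m' x) (fun x => pvAGo rb ac fob L x)
          recipes hgA hg none m hm
        have hcv : pvAGo rb ac fob (L+1) v =
            (let st := pvAOuterGo (fun x => pvAGo rb ac fob L x) recipes (-1, true, false, none)
             (st.2.2.1, st.1, st.2.2.2)) := by
          simp only [pvAGo, if_neg hf, hacn, hrb]
        have hrel : pvRel (none : Option (Int × List (PySem.Dict String Int))) =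
            ((-1 : Int), true, false, (none : Option (PySem.Dict String Int))) := rfl
        rw [hrel] at ho1
        simp only [pvBSolve, hmv, if_neg hf, hacn, hrb]
        constructor
        · rw [hcv]
          simp only [ho1]
          cases hq : (pvBOuterGo (fun m' x => pvBSolve rb ac fob t m' x) recipes (none, m)).1 with
          | none => simp [pvRel]
          | some b => obtain ⟨c, parts⟩ := b; simp [pvRel]
        · apply pvInv_insert _ _ _ _ ho2
          rw [hcv]
          simp only [ho1]
          cases hq : (pvBOuterGo (fun m' x => pvBSolve rb ac fob t m' x) recipes (none, m)).1 with
          | none => simp [pvRel]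
          | some b => obtain ⟨c, parts⟩ := b; simp [pvRel]
      · -- inactive item: one-step value, memoized
        have hact' : pvActive rb ac fob v = false := by simpa using hact
        have hbase : pvAGo rb ac fob (L+1) v = pvBase ac fob v :=
          pvAGo_inactive rb ac fob v hact' L
        simp only [pvBSolve, hmv]
        unfold pvBase at hbase
        by_cases hf : v ∈ fob
        · simp only [if_pos hf]
          simp only [if_pos hf] at hbase
          exact ⟨hbase.symm, pvInv_insert _ _ _ _ hm hbase.symm⟩
        · simp only [if_neg hf]
          simp only [if_neg hf] at hbase
          cases hac : ac.get? v with
          | some c =>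
            simp only [hac] at hbase
            exact ⟨hbase.symm, pvInv_insert _ _ _ _ hm hbase.symm⟩
          | none =>
            cases hrb : rb.get? v with
            | some recipes =>
              exfalso
              simp [pvActive, hf, hac, hrb] at hact'
            | none =>
              simp only [hac] at hbase
              exact ⟨hbase.symm, pvInv_insert _ _ _ _ hm hbase.symm⟩

theorem cheapest_flat_recipe_helper_spec : Claim_equal_cheapest_flat_recipe_helper := by
  unfold Claim_equal_cheapest_flat_recipe_helper
  intro rb ac fi fob _hDom hPre
  unfold Spec_cheapest_flat_recipe_helper
  simp only [Pre_cheapest_flat_recipe_helper] at hPre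
  obtain ⟨hfi, hclos, hrk⟩ := hPre
  have hInvE : pvInv (pvAGo (PySem.Dict.ofList rb) (PySem.Dict.ofList ac) (fob.getD []) (rb.length + 1))
      PySem.Dict.empty := by
    intro k r h
    simp [PySem.Dict.get?_empty] at h
  have hμ : pvMu (PySem.Dict.ofList rb) (PySem.Dict.ofList ac) (fob.getD [])
      (fun v => (pvRank (PySem.Dict.ofList rb) (PySem.Dict.ofList ac) (fob.getD [])
        (PySem.Dict.ofList rb).keys rb.length).getD v 0) fi < rb.length + 1 := by
    unfold pvMu
    split
    · next hact => exact Nat.lt_succ_of_le (hrk fi hfi hact).2.1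
    · omega
  have main := pvBSolve_ok (PySem.Dict.ofList rb) (PySem.Dict.ofList ac) (fob.getD [])
      (fun v => (pvRank (PySem.Dict.ofList rb) (PySem.Dict.ofList ac) (fob.getD [])
        (PySem.Dict.ofList rb).keys rb.length).getD v 0)
      (pvReach (PySem.Dict.ofList rb) (PySem.Dict.ofList ac) (fob.getD []) fi rb.length)
      rb.length hclos hrk (rb.length + 1) fi PySem.Dict.empty (fun _ => hfi) hμ hInvE
  unfold cheapest_flat_recipe_helper cheapest_flat_recipe_helper_alt
  rw [main.1]
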